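-- pv_equiv track=rewrite | github.com/MrBrantCode/unitest_baseline | mut_generate/mist_train_cf/cf_36926/solution.py | vowel_game_score
-- ===== SOURCE A (Python) =====
-- def vowel_game_score(s: str) -> str:
--     vowels = "aeiou"
--     stuart = 0
--     kevin = 0
--     length = len(s)
--
--     for i in range(length):
--         if s[i] in vowels:
--             kevin += length - i
--         else:
--             stuart += length - i
--
--     if stuart > kevin:
--         return f"Stuart {stuart}"
--     elif kevin > stuart:
--         return f"Kevin {kevin}"
--     else:
--         return "Draw"
-- ===== SOURCE B (Python) =====
-- def vowel_game_score(s: str) -> str: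
--     # Prefix-count accumulation: a vowel at index i is inside the running
--     # vowel count on steps i..len-1, i.e. it contributes len-i in total,
--     # exactly A's positional weight -- but no position weights are computed.
--     kevin = 0
--     stuart = 0
--     vowels_so_far = 0
--     pos = 0
--     for c in s:
--         pos += 1
--         if c in "aeiou":
--             vowels_so_far += 1
--         kevin += vowels_so_far
--         stuart += pos - vowels_so_far
--     if stuart > kevin:
--         return f"Stuart {stuart}"
--     elif kevin > stuart:
--         return f"Kevin {kevin}"
--     else:
--         return "Draw"
-- ===== Notes on version B (the rewrite author's own statement) =====
-- stated objective: alternative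
-- what changed: B never computes positional weights length-i: it sums running prefix counts (kevin += vowels-so-far, stuart += pos - vowels-so-far) each step, which totals the same scores by the counting identity sum_i (len-i over vowels) = sum_j (vowels in prefix j).
import Mathlib
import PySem

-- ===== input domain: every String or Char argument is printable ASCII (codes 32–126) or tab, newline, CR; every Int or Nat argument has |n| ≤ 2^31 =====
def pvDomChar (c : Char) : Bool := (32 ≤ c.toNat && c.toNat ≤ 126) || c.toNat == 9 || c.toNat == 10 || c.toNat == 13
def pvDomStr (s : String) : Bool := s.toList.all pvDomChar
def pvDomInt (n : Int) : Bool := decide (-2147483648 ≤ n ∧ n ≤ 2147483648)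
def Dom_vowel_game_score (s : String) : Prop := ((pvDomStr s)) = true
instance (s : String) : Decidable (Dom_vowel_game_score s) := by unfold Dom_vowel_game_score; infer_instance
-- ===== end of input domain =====

-- B replaces A's positional weights (length - i) by summing running prefix
-- vowel/consonant counts each step (objective: alternative, same cost).


-- ===== PORT A =====
-- for i in range(length): if s[i] in vowels: kevin += length-i else: stuart += length-i
-- (indexing s[i] over range(length) is ported as a fold over enumerate s.toList, exact
-- here since every index is in range)
def vowel_game_score (s : String) : String :=
  let length : Int := (s.toList.length : Int)
  let p :=
    (PySem.List.enumerate s.toList 0).foldl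
      (fun (acc : Int × Int) (ic : Int × Char) =>
        if ic.2 ∈ ['a', 'e', 'i', 'o', 'u'] then (acc.1, acc.2 + (length - ic.1))
        else (acc.1 + (length - ic.1), acc.2))
      (0, 0)
  let stuart := p.1
  let kevin := p.2
  if stuart > kevin then "Stuart " ++ PySem.Int.toStr stuart
  else if kevin > stuart then "Kevin " ++ PySem.Int.toStr kevin
  else "Draw"

-- ===== PORT B =====
-- one pass over the characters; state (kevin, stuart, vowels_so_far, pos)
def vowel_game_score_alt (s : String) : String :=
  let p :=
    s.toList.foldl
      (fun (acc : Int × Int × Int × Int) (c : Char) =>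
        let pos := acc.2.2.2 + 1
        let v := if c ∈ ['a', 'e', 'i', 'o', 'u'] then acc.2.2.1 + 1 else acc.2.2.1
        (acc.1 + v, acc.2.1 + pos - v, v, pos))
      (0, 0, 0, 0)
  let kevin := p.1
  let stuart := p.2.1
  if stuart > kevin then "Stuart " ++ PySem.Int.toStr stuart
  else if kevin > stuart then "Kevin " ++ PySem.Int.toStr kevin
  else "Draw"

-- ===== PRECONDITION & SPEC =====
def Spec_vowel_game_score (s : String) (out : String) : Prop := out = vowel_game_score_alt s
instance (s : String) (out : String) : Decidable (Spec_vowel_game_score s out) := by unfold Spec_vowel_game_score; infer_instance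

-- ===== CLAIM (what is proved, stated in full; the proofs are below) =====
def Claim_equal_vowel_game_score : Prop := ∀ (s : String), Dom_vowel_game_score s → Spec_vowel_game_score s (vowel_game_score s)

-- ===== LEMMAS AND PROOFS =====

-- Σ over vowels of (n - index), indices starting at i
def pvWv (n : Int) : List Char → Int → Int
  | [], _ => 0
  | c :: xs, i => (if c ∈ ['a', 'e', 'i', 'o', 'u'] then n - i else 0) + pvWv n xs (i + 1)

-- Σ over all characters of (n - index), indices starting at i
def pvSumW (n : Int) : List Char → Int → Int
  | [], _ => 0
  | _ :: xs, i => (n - i) + pvSumW n xs (i + 1)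

-- 1 + 2 + ... + |l|
def pvTri : List Char → Int
  | [] => 0
  | _ :: xs => ((xs.length : Int) + 1) + pvTri xs

theorem pvWv_shift (l : List Char) (n i : Int) : pvWv n l (i + 1) = pvWv (n - 1) l i := by
  induction l generalizing i with
  | nil => rfl
  | cons c xs ih => simp only [pvWv, ih]; ring_nf

theorem pvSumW_shift (l : List Char) (n i : Int) : pvSumW n l (i + 1) = pvSumW (n - 1) l i := by
  induction l generalizing i with
  | nil => rfl
  | cons c xs ih => simp only [pvSumW, ih]; ring_nf

theorem pvSumW_tri (l : List Char) : pvSumW (l.length : Int) l 0 = pvTri l := by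
  induction l with
  | nil => rfl
  | cons c xs ih =>
      simp only [pvSumW, pvTri, List.length_cons]
      rw [show ((0 : Int) + 1) = 0 + 1 by ring, pvSumW_shift]
      push_cast
      rw [show ((xs.length : Int) + 1 - 1) = (xs.length : Int) by ring, ih]
      ring

-- A's fold over enumerate computes (consonant-weight sum, vowel-weight sum)
theorem foldA_eq (n : Int) (l : List Char) (j a b : Int) :
    ((PySem.List.enumerate l j).foldl
      (fun (acc : Int × Int) (ic : Int × Char) =>
        if ic.2 ∈ ['a', 'e', 'i', 'o', 'u'] then (acc.1, acc.2 + (n - ic.1))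
        else (acc.1 + (n - ic.1), acc.2)) (a, b))
    = (a + (pvSumW n l j - pvWv n l j), b + pvWv n l j) := by
  induction l generalizing j a b with
  | nil => simp [PySem.List.enumerate_nil, pvSumW, pvWv]
  | cons c xs ih =>
      rw [PySem.List.enumerate_cons]
      simp only [List.foldl_cons, pvSumW, pvWv]
      split_ifs with h <;> rw [ih] <;>
        simp only [Prod.mk.injEq] <;> constructor <;> ring

-- B's fold invariant: state (kevin, stuart, vowels_so_far, pos)
theorem foldB_eq (l : List Char) (k st v p : Int) :
    (l.foldl
      (fun (acc : Int × Int × Int × Int) (c : Char) =>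
        let pos := acc.2.2.2 + 1
        let v := if c ∈ ['a', 'e', 'i', 'o', 'u'] then acc.2.2.1 + 1 else acc.2.2.1
        (acc.1 + v, acc.2.1 + pos - v, v, pos))
      (k, st, v, p))
    = (k + (l.length : Int) * v + pvWv (l.length : Int) l 0,
       st + (l.length : Int) * (p - v) + pvTri l - pvWv (l.length : Int) l 0,
       v + (l.countP (fun c => c ∈ ['a', 'e', 'i', 'o', 'u']) : Int),
       p + (l.length : Int)) := by
  induction l generalizing k st v p with
  | nil => simp [pvWv, pvTri]
  | cons c xs ih =>
      simp only [List.foldl_cons]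
      rw [ih]
      have hWv : pvWv ((c :: xs).length : Int) (c :: xs) 0
          = (if c ∈ ['a', 'e', 'i', 'o', 'u'] then ((xs.length : Int) + 1) else 0)
            + pvWv (xs.length : Int) xs 0 := by
        simp only [pvWv, List.length_cons]
        rw [show ((0 : Int) + 1) = 0 + 1 by ring, pvWv_shift]
        push_cast
        rw [show ((xs.length : Int) + 1 - 1) = (xs.length : Int) by ring]
        split_ifs <;> ring
      rw [hWv]
      simp only [List.countP_cons, pvTri, Prod.mk.injEq, decide_eq_true_eq,
        List.length_cons]
      by_cases h : c ∈ ['a', 'e', 'i', 'o', 'u'] <;>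
        simp only [h, if_true, if_false] <;> push_cast <;>
        refine ⟨by ring, by ring, by ring, by ring⟩

-- ===== VERDICT (by name: the statement is the Claim_ definition above) =====
theorem vowel_game_score_spec : Claim_equal_vowel_game_score := by
  intro s _
  unfold Spec_vowel_game_score vowel_game_score vowel_game_score_alt
  simp only
  rw [foldA_eq, foldB_eq]
  simp only
  have h1 : (0 : Int) + (pvSumW (s.toList.length : Int) s.toList 0 - pvWv (s.toList.length : Int) s.toList 0)
      = 0 + (s.toList.length : Int) * (0 - 0) + pvTri s.toList - pvWv (s.toList.length : Int) s.toList 0 := by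
    rw [pvSumW_tri]; ring
  have h2 : (0 : Int) + pvWv (s.toList.length : Int) s.toList 0
      = 0 + (s.toList.length : Int) * 0 + pvWv (s.toList.length : Int) s.toList 0 := by ring
  rw [h1, h2]
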